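-- pv_equiv track=rewrite | github.com/qr-wang/qr-wang.github.io | teaching/2025F_SM/粒子从左到右扩散_熵.py | initialize_particles
-- ===== SOURCE A (Python) =====
-- def initialize_particles(L, N):
--     particles = []
--     for col in range(L):  # 从左到右遍历列
--         for row in range(L):  # 从上到下遍历行
--             if len(particles) >= N:  # 如果已经放置了N个粒子，则停止
--                 return particles
--             particles.append((row, col))  # 添加粒子位置（行，列）
--     return particles
-- ===== SOURCE B (Python) =====
-- def initialize_particles(L, N):
--     m = L if L > 0 else 0
--     count = min(N, m * m)
--     if count < 0:
--         count = 0
--     return [(i % m, i // m) for i in range(count)]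
-- ===== Notes on version B (the rewrite author's own statement) =====
-- stated objective: simpler
-- what changed: Replaces the nested col/row loop with per-step length check and early return by a single flat range over the particle count, deriving each (row, col) pair from the flat index i as (i % L, i // L).
import Mathlib
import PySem

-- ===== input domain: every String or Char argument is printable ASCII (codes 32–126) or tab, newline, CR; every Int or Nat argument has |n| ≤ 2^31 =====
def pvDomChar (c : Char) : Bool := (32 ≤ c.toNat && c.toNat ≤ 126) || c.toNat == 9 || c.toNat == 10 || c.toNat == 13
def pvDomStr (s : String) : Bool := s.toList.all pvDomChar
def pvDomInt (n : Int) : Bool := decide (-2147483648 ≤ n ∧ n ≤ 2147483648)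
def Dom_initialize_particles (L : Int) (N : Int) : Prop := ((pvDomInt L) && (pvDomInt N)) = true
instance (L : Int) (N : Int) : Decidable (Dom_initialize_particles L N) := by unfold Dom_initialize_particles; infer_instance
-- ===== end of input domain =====

-- B replaces A's nested col/row loop with its per-step early-return check by a single flat
-- range over the particle count, computing each (row, col) as (i % L, i // L) (objective: simpler).

-- ===== PORT A =====
-- inner 'for row in range(L)' loop; row counts up, k rows remain (range is lazy in Python);
-- the Bool flag records the early 'return particles'
def ipInnerA (col N row : Int) (k : Nat) (acc : List (Int × Int)) : List (Int × Int) × Bool :=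
  match k with
  | 0 => (acc, false)
  | k' + 1 =>
    if N ≤ (acc.length : Int) then (acc, true)
    else ipInnerA col N (row + 1) k' (acc ++ [(row, col)])

-- outer 'for col in range(L)' loop
def ipOuterA (L N col : Int) (k : Nat) (acc : List (Int × Int)) : List (Int × Int) :=
  match k with
  | 0 => acc
  | k' + 1 =>
    match ipInnerA col N 0 L.toNat acc with
    | (acc', true) => acc'          -- early 'return particles' propagates out
    | (acc', false) => ipOuterA L N (col + 1) k' acc'

def initialize_particles (L : Int) (N : Int) : List (Int × Int) :=
  ipOuterA L N 0 L.toNat []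

-- ===== PORT B =====
def initialize_particles_alt (L : Int) (N : Int) : List (Int × Int) :=
  let m : Int := if L > 0 then L else 0
  let count : Int := if min N (m * m) < 0 then 0 else min N (m * m)
  (PySem.List.pyRange 0 count 1).map (fun i => (PySem.Int.mod i m, PySem.Int.floordiv i m))

-- ===== PRECONDITION & SPEC =====
def Spec_initialize_particles (L : Int) (N : Int) (out : List (Int × Int)) : Prop := out = initialize_particles_alt L N
instance (L : Int) (N : Int) (out : List (Int × Int)) : Decidable (Spec_initialize_particles L N out) := by unfold Spec_initialize_particles; infer_instance

-- ===== CLAIM (what is proved, stated in full; the proofs are below) =====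
def Claim_equal_initialize_particles : Prop := ∀ (L : Int) (N : Int), Dom_initialize_particles L N → Spec_initialize_particles L N (initialize_particles L N)

-- ===== LEMMAS AND PROOFS =====

-- A's loop linearised: run the same check-then-append step over one flat list of positions
def ipRun (N : Int) (ps : List (Int × Int)) (acc : List (Int × Int)) : List (Int × Int) :=
  match ps with
  | [] => acc
  | p :: rest =>
    if N ≤ (acc.length : Int) then acc
    else ipRun N rest (acc ++ [p])

theorem ipRun_of_ge (N : Int) (ps acc : List (Int × Int)) (h : N ≤ (acc.length : Int)) :
    ipRun N ps acc = acc := by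
  cases ps <;> simp [ipRun, h]

theorem ipRun_append (N : Int) (ps qs acc : List (Int × Int)) :
    ipRun N (ps ++ qs) acc = ipRun N qs (ipRun N ps acc) := by
  induction ps generalizing acc with
  | nil => simp [ipRun]
  | cons p rest ih =>
    by_cases h : N ≤ (acc.length : Int)
    · simp [ipRun, h, ipRun_of_ge N qs acc h]
    · simp [ipRun, h, ih]

theorem ipInnerA_fst (col N : Int) : ∀ (k : Nat) (row : Int) (acc : List (Int × Int)),
    (ipInnerA col N row k acc).1
      = ipRun N ((List.range k).map (fun j => (row + Int.ofNat j, col))) acc := by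
  intro k
  induction k with
  | zero => intro row acc; simp [ipInnerA, ipRun]
  | succ k ih =>
    intro row acc
    have hmap : (List.range (k + 1)).map (fun j => (row + Int.ofNat j, col))
        = (row, col) :: (List.range k).map (fun j => ((row + 1) + Int.ofNat j, col)) := by
      rw [List.range_succ_eq_map]
      simp only [List.map_cons, List.map_map]
      congr 1
      · simp [Int.ofNat_eq_natCast]
      · apply List.map_congr_left
        intro j _
        simp only [Function.comp_apply, Prod.mk.injEq, and_true]
        push_cast [Int.ofNat_eq_natCast]
        ring
    rw [hmap]
    by_cases h : N ≤ (acc.length : Int)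
    · simp [ipInnerA, ipRun, h]
    · simp only [ipInnerA, ipRun, if_neg h]
      exact ih (row + 1) (acc ++ [(row, col)])

theorem ipInnerA_snd (col N : Int) : ∀ (k : Nat) (row : Int) (acc : List (Int × Int)),
    (ipInnerA col N row k acc).2 = true →
    N ≤ (((ipInnerA col N row k acc).1.length : Nat) : Int) := by
  intro k
  induction k with
  | zero => intro row acc h; simp [ipInnerA] at h
  | succ k ih =>
    intro row acc h
    by_cases hle : N ≤ (acc.length : Int)
    · simp [ipInnerA, hle]
    · simp only [ipInnerA, if_neg hle] at h ⊢
      exact ih _ _ h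

theorem ipOuterA_eq_ipRun (L N : Int) : ∀ (k : Nat) (col : Int) (acc : List (Int × Int)),
    ipOuterA L N col k acc
      = ipRun N ((List.range k).flatMap
          (fun cj => (List.range L.toNat).map (fun r => (Int.ofNat r, col + Int.ofNat cj)))) acc := by
  intro k
  induction k with
  | zero => intro col acc; simp [ipOuterA, ipRun]
  | succ k ih =>
    intro col acc
    have hsplit : (List.range (k + 1)).flatMap
          (fun cj => (List.range L.toNat).map (fun r => (Int.ofNat r, col + Int.ofNat cj)))
        = (List.range L.toNat).map (fun r => (Int.ofNat r, col))
          ++ (List.range k).flatMap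
              (fun cj => (List.range L.toNat).map (fun r => (Int.ofNat r, (col + 1) + Int.ofNat cj))) := by
      rw [List.range_succ_eq_map]
      simp only [List.flatMap_cons, List.flatMap_map]
      congr 1
      · apply List.map_congr_left
        intro r _
        simp [Int.ofNat_eq_natCast]
      · apply List.flatMap_congr
        intro cj _
        apply List.map_congr_left
        intro r _
        simp only [Prod.mk.injEq, true_and]
        push_cast [Int.ofNat_eq_natCast]
        ring
    have hinner0 : (List.range L.toNat).map (fun r => (Int.ofNat r, col))
        = (List.range L.toNat).map (fun j => ((0 : Int) + Int.ofNat j, col)) := by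
      apply List.map_congr_left
      intro r _
      simp
    rcases hin : ipInnerA col N 0 L.toNat acc with ⟨acc', fl⟩
    have hfst := ipInnerA_fst col N L.toNat 0 acc
    rw [hin] at hfst
    cases fl with
    | true =>
      have hge := ipInnerA_snd col N L.toNat 0 acc (by rw [hin])
      rw [hin] at hge
      simp only [ipOuterA, hin, hsplit, ipRun_append, hinner0, ← hfst]
      exact (ipRun_of_ge N _ acc' (by exact_mod_cast hge)).symm
    | false =>
      simp only [ipOuterA, hin, hsplit, ipRun_append, hinner0, ← hfst]
      exact ih (col + 1) acc'

theorem ipRun_eq_take (N : Int) (ps acc : List (Int × Int)) :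
    ipRun N ps acc = acc ++ ps.take (N - acc.length).toNat := by
  induction ps generalizing acc with
  | nil => simp [ipRun]
  | cons p rest ih =>
    by_cases h : N ≤ (acc.length : Int)
    · have : (N - (acc.length : Int)).toNat = 0 := by omega
      simp [ipRun, h, this]
    · have ht : (N - (acc.length : Int)).toNat = (N - ((acc ++ [p]).length : Int)).toNat + 1 := by
        simp only [List.length_append, List.length_cons, List.length_nil]
        push_cast
        omega
      simp only [ipRun, if_neg h, ih, ht, List.take_succ_cons, List.append_assoc,
        List.singleton_append]

-- column-major grid of c columns, n rows each, as a single indexed range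
theorem grid_flat (n : Nat) : ∀ c : Nat,
    (List.range c).flatMap (fun cj => (List.range n).map (fun r => (Int.ofNat r, Int.ofNat cj)))
      = (List.range (c * n)).map
          (fun i => (((i % n : Nat) : Int), ((i / n : Nat) : Int))) := by
  intro c
  induction c with
  | zero => simp
  | succ c ih =>
    rw [List.range_succ, List.flatMap_append, ih, Nat.succ_mul, List.range_add, List.map_append]
    congr 1
    simp only [List.flatMap_cons, List.flatMap_nil, List.append_nil, List.map_map]
    apply List.map_congr_left
    intro r hr
    rw [List.mem_range] at hr
    have h1 : (c * n + r) % n = r := by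
      rw [Nat.mul_comm, Nat.mul_add_mod, Nat.mod_eq_of_lt hr]
    have h2 : (c * n + r) / n = c := by
      rw [Nat.mul_comm, Nat.mul_add_div (by omega : 0 < n), Nat.div_eq_of_lt hr]
      omega
    simp [Function.comp, Int.ofNat_eq_natCast, h1, h2]

theorem initialize_particles_eq (L N : Int) :
    initialize_particles L N = initialize_particles_alt L N := by
  by_cases hL : L > 0
  · -- positive side length: both are the first min(N, L*L) positions
    set n : Nat := L.toNat with hn
    have hLn : L = (n : Int) := by omega
    have hm : (if L > 0 then L else 0) = (n : Int) := by rw [if_pos hL, hLn]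
    -- A reduces to a take of the flat grid
    have hA : initialize_particles L N
        = ((List.range (n * n)).map
            (fun i => (((i % n : Nat) : Int), ((i / n : Nat) : Int)))).take N.toNat := by
      rw [initialize_particles, ipOuterA_eq_ipRun, ipRun_eq_take]
      simp only [hLn, Int.toNat_natCast, zero_add]
      rw [grid_flat]
      simp
    -- B reduces to a map over the same truncated range
    have hcount : (if min N ((n : Int) * n) < 0 then 0 else min N ((n : Int) * n)).toNat
        = min N.toNat (n * n) := by
      rw [show ((n : Int) * n) = ((n * n : Nat) : Int) by push_cast; ring]
      split_ifs with hneg <;> omega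
    have hB : initialize_particles_alt L N
        = (List.range (min N.toNat (n * n))).map
            (fun i => (((i % n : Nat) : Int), ((i / n : Nat) : Int))) := by
      rw [initialize_particles_alt]
      simp only [hm]
      rw [PySem.List.pyRange_zero, hcount, List.map_map]
      apply List.map_congr_left
      intro i _
      simp [Function.comp, PySem.Int.mod_natCast, PySem.Int.floordiv_natCast]
    rw [hA, hB, ← List.map_take, List.take_range]
  · -- L ≤ 0: A's ranges are empty and B's count is ≤ 0, both give []
    have hA : initialize_particles L N = [] := by
      rw [initialize_particles, show L.toNat = 0 by omega]
      rfl
    have hB : initialize_particles_alt L N = [] := by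
      rw [initialize_particles_alt]
      simp only [if_neg hL]
      have : (if min N ((0 : Int) * 0) < 0 then (0 : Int) else min N (0 * 0)) ≤ 0 := by
        split_ifs with h <;> omega
      rw [PySem.List.pyRange_one_eq_nil (by omega)]
      simp
    rw [hA, hB]

-- ===== VERDICT (by name: the statement is the Claim_ definition above) =====
theorem initialize_particles_spec : Claim_equal_initialize_particles := by
  intro L N _
  exact initialize_particles_eq L N
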